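-- pv_equiv track=rewrite | github.com/kupl/qsyn | qsyn/util/state_search_utils.py | check_will_entangling
-- ===== SOURCE A (Python) =====
-- from typing import Tuple, Dict, List, Union, Set
--
-- def connect_components(li_of_set):
--     # https://stackoverflow.com/questions/54673308/how-to-merge-sets-which-have-intersections-connected-components-algorithm
--     pool = set(map(frozenset, li_of_set))
--     groups = []
--     while pool:
--         groups.append(set(pool.pop()))
--         while True:
--             for candidate in pool:
--                 if groups[-1] & candidate:
--                     groups[-1] |= candidate
--                     pool.remove(candidate)
--                     break
--             else:
--                 break
--     return groups
--
-- def check_will_entangling(li_pair : List[Tuple[int]], qubits_tobe_entgled : List[int], superposed_qubits : List[int]) -> bool: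
--     set_of_entagled_subregister = list()
--     if not set(li_pair[0]).intersection(set(superposed_qubits)):
--         return False
--     # superposed_qubits = q_sp
--     # li_pair = q_1, .., q_n
--     for x in li_pair:
--         if set(x).intersection(set(superposed_qubits)):
--             temp  = set(x)
--             set_of_entagled_subregister.append(temp)
--         else :
--             for entangled_subregister in set_of_entagled_subregister:
--                 if set(x).intersection(entangled_subregister):
--                     entangled_subregister.update(x)
--                     break
--     set_of_entagled_subregister = connect_components(set_of_entagled_subregister)
--     return len(set_of_entagled_subregister) == 1 and set(set_of_entagled_subregister[0]) == set(qubits_tobe_entgled)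
-- ===== SOURCE B (Python) =====
-- def check_will_entangling(li_pair, qubits_tobe_entgled, superposed_qubits):
--     sp = set(superposed_qubits)
--     if sp.isdisjoint(li_pair[0]):
--         return False
--     comps = []  # pairwise-disjoint, eagerly merged entangled components
--     for x in li_pair:
--         merged = set(x)
--         rest = []
--         for c in comps:
--             if merged.isdisjoint(c):
--                 rest.append(c)
--             else:
--                 merged.update(c)
--         if len(rest) < len(comps) or not sp.isdisjoint(merged):
--             comps = rest + [merged]
--     return len(comps) == 1 and comps[0] == set(qubits_tobe_entgled)
-- ===== Notes on version B (the rewrite author's own statement) =====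
-- stated objective: faster
-- what changed: B keeps the entangled components eagerly merged and pairwise disjoint in a single forward pass (each pair absorbs every component it touches), so A's quadratic post-hoc connect_components pass and its append-then-mutate-first-match bookkeeping disappear.
import Mathlib
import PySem

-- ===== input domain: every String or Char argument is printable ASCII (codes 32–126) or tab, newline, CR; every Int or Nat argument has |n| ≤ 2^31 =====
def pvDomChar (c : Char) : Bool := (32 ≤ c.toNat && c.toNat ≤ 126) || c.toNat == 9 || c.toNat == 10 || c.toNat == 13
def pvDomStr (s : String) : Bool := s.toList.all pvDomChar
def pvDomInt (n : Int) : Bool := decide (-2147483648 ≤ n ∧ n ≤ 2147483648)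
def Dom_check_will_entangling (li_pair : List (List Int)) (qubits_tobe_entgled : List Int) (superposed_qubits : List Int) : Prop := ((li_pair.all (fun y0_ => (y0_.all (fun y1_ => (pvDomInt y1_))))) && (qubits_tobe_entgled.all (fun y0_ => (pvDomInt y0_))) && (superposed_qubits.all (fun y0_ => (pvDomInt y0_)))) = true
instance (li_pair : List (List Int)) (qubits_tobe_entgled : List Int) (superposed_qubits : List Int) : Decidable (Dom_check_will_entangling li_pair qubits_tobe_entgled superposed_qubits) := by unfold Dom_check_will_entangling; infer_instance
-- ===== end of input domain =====

-- B replaces A's "append subregisters, mutate the first intersecting one, then a quadratic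
-- connected-components pass" by ONE forward pass that keeps the entangled components eagerly
-- merged and pairwise disjoint, so no final connect_components pass is needed.
-- A mutates the sets it stores internally only; no argument is mutated.

-- ===== PORT A =====
-- the loop body of check_will_entangling: append a new subregister, or update
-- (in place) the FIRST stored subregister that intersects x, scanning in list order
def pvUpdFirst (x : List Int) : List (PySem.Set Int) → List (PySem.Set Int)
  | [] => []
  | s :: r =>
    if !(PySem.Set.inter (PySem.Set.ofList x) s).isEmpty then PySem.Set.update s x :: r
    else s :: pvUpdFirst x r

def pvStepA (spS : PySem.Set Int) (L : List (PySem.Set Int)) (x : List Int) : List (PySem.Set Int) :=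
  if !(PySem.Set.inter (PySem.Set.ofList x) spS).isEmpty then L ++ [PySem.Set.ofList x]
  else pvUpdFirst x L

-- connect_components: Python's `pool = set(map(frozenset, li))` deduplicates by set
-- equality and is then iterated/popped in UNSPECIFIED hash order; we model the pool as a
-- list (first-occurrence dedup, head pop, in-order candidate scan).  The Boolean the
-- caller derives from the result is independent of that order (that is what the
-- equivalence theorem below proves).
def pvDedupSets (l : List (PySem.Set Int)) : List (PySem.Set Int) :=
  l.foldl (fun acc s => if acc.any (fun t => PySem.Set.equal s t) then acc else acc ++ [s]) []

-- the inner `while True: for candidate in pool: …` — find the first candidate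
-- intersecting the current group, returning it and the pool without it
def pvFirstTouch (g : PySem.Set Int) : List (PySem.Set Int) → Option (PySem.Set Int × List (PySem.Set Int))
  | [] => none
  | c :: r =>
    if !(PySem.Set.inter g c).isEmpty then some (c, r)
    else match pvFirstTouch g r with
      | none => none
      | some (c', r') => some (c', c :: r')

theorem pvFirstTouch_length : ∀ {g : PySem.Set Int} {pool c r}, pvFirstTouch g pool = some (c, r) → r.length < pool.length := by
  intro g pool
  induction pool with
  | nil => intro c r h; simp [pvFirstTouch] at h
  | cons s t ih =>
    intro c r h
    simp only [pvFirstTouch] at h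
    split at h
    · cases h; simp
    · cases hft : pvFirstTouch g t with
      | none => rw [hft] at h; cases h
      | some cr =>
        rw [hft] at h
        obtain ⟨c', r'⟩ := cr
        cases h
        simpa using Nat.succ_lt_succ (ih hft)

-- grow groups[-1] by absorbing intersecting candidates until none intersects
def pvGrow (g : PySem.Set Int) (pool : List (PySem.Set Int)) : PySem.Set Int × List (PySem.Set Int) :=
  match h : pvFirstTouch g pool with
  | none => (g, pool)
  | some (c, r) => pvGrow (PySem.Set.union g c) r
  termination_by pool.length
  decreasing_by exact pvFirstTouch_length h

theorem pvGrow_snd_le : ∀ (g : PySem.Set Int) (pool : List (PySem.Set Int)), (pvGrow g pool).2.length ≤ pool.length := by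
  intro g pool
  induction g, pool using pvGrow.induct with
  | case1 g pool h => rw [pvGrow, h]
  | case2 g pool c r h ih =>
    rw [pvGrow, h]
    exact le_trans ih (le_of_lt (pvFirstTouch_length h))

-- outer `while pool:` loop of connect_components
def pvCC (pool : List (PySem.Set Int)) : List (PySem.Set Int) :=
  match pool with
  | [] => []
  | g :: rest => (pvGrow g rest).1 :: pvCC (pvGrow g rest).2
  termination_by pool.length
  decreasing_by simpa using Nat.lt_succ_of_le (pvGrow_snd_le g rest)

def check_will_entangling (li_pair : List (List Int)) (qubits_tobe_entgled : List Int) (superposed_qubits : List Int) : Bool :=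
  match li_pair with
  | [] => false   -- li_pair[0] raises IndexError; excluded by Pre_
  | x0 :: _ =>
    let spS := PySem.Set.ofList superposed_qubits
    if (PySem.Set.inter (PySem.Set.ofList x0) spS).isEmpty then false
    else
      let L := li_pair.foldl (pvStepA spS) []
      let groups := pvCC (pvDedupSets L)
      decide (groups.length = 1) &&
        PySem.Set.equal (PySem.Set.ofList (groups.headD [])) (PySem.Set.ofList qubits_tobe_entgled)

-- ===== PORT B =====
-- one loop body: absorb every component touching x into `merged`, keep the rest;
-- the pair is (rest, merged), folded over the current components in order
def pvStepB (spS : PySem.Set Int) (comps : List (PySem.Set Int)) (x : List Int) : List (PySem.Set Int) :=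
  let p := comps.foldl
    (fun (p : List (PySem.Set Int) × PySem.Set Int) c =>
      if PySem.Set.isdisjoint p.2 c then (p.1 ++ [c], p.2) else (p.1, PySem.Set.update p.2 c))
    ([], PySem.Set.ofList x)
  if p.1.length < comps.length || !(PySem.Set.isdisjoint spS p.2) then p.1 ++ [p.2] else comps

def check_will_entangling_alt (li_pair : List (List Int)) (qubits_tobe_entgled : List Int) (superposed_qubits : List Int) : Bool :=
  match li_pair with
  | [] => false   -- li_pair[0] raises IndexError; excluded by Pre_
  | x0 :: _ =>
    let spS := PySem.Set.ofList superposed_qubits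
    if PySem.Set.isdisjoint spS x0 then false
    else
      let comps := li_pair.foldl (pvStepB spS) []
      decide (comps.length = 1) &&
        PySem.Set.equal (comps.headD []) (PySem.Set.ofList qubits_tobe_entgled)

-- ===== PRECONDITION & SPEC =====
-- Pre_ excludes only li_pair = [], on which both A and B raise IndexError at li_pair[0].
def Pre_check_will_entangling (li_pair : List (List Int)) (qubits_tobe_entgled : List Int) (superposed_qubits : List Int) : Prop := li_pair ≠ []
instance (li_pair : List (List Int)) (qubits_tobe_entgled : List Int) (superposed_qubits : List Int) : Decidable (Pre_check_will_entangling li_pair qubits_tobe_entgled superposed_qubits) := by unfold Pre_check_will_entangling; infer_instance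

def pvWitness_check_will_entangling : List (List Int) × List Int × List Int := ([[0, 1]], [0, 1], [0])

def Spec_check_will_entangling (li_pair : List (List Int)) (qubits_tobe_entgled : List Int) (superposed_qubits : List Int) (out : Bool) : Prop := out = check_will_entangling_alt li_pair qubits_tobe_entgled superposed_qubits
instance (li_pair : List (List Int)) (qubits_tobe_entgled : List Int) (superposed_qubits : List Int) (out : Bool) : Decidable (Spec_check_will_entangling li_pair qubits_tobe_entgled superposed_qubits out) := by unfold Spec_check_will_entangling; infer_instance

-- ===== CLAIM (what is proved, stated in full; the proofs are below) =====
def Claim_equal_check_will_entangling : Prop := ∀ (li_pair : List (List Int)) (qubits_tobe_entgled : List Int) (superposed_qubits : List Int), Dom_check_will_entangling li_pair qubits_tobe_entgled superposed_qubits → Pre_check_will_entangling li_pair qubits_tobe_entgled superposed_qubits → Spec_check_will_entangling li_pair qubits_tobe_entgled superposed_qubits (check_will_entangling li_pair qubits_tobe_entgled superposed_qubits)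

-- ===== LEMMAS AND PROOFS =====

-- `a is a qubit mentioned by some stored set of L`
def pvMemU (L : List (PySem.Set Int)) (a : Int) : Prop := ∃ s ∈ L, a ∈ s

-- connectivity of two qubits through the stored sets (the intersection graph)
inductive pvRel (L : List (PySem.Set Int)) : Int → Int → Prop
  | base {s : PySem.Set Int} {a b : Int} : s ∈ L → a ∈ s → b ∈ s → pvRel L a b
  | trans {a b c : Int} : pvRel L a b → pvRel L b c → pvRel L a c

def pvNE (L : List (PySem.Set Int)) : Prop := ∀ s ∈ L, ∃ a : Int, a ∈ s
def pvDisj (c d : PySem.Set Int) : Prop := ∀ a : Int, a ∈ c → a ∉ d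
def pvTouch (x : List Int) (c : PySem.Set Int) : Prop := ∃ a : Int, a ∈ x ∧ a ∈ c

-- C is the list of connected components of the sets stored in L
def pvInv (L C : List (PySem.Set Int)) : Prop :=
  (∀ c ∈ C, ∃ a : Int, a ∈ c) ∧
  C.Pairwise pvDisj ∧
  (∀ c ∈ C, ∀ a b : Int, a ∈ c → b ∈ c → pvRel L a b) ∧
  (∀ s ∈ L, ∃ c ∈ C, ∀ a : Int, a ∈ s → a ∈ c) ∧
  (∀ c ∈ C, ∀ a : Int, a ∈ c → pvMemU L a)

theorem pvRel_symm {L : List (PySem.Set Int)} {a b : Int} (h : pvRel L a b) : pvRel L b a := by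
  induction h with
  | base hs ha hb => exact pvRel.base hs hb ha
  | trans _ _ ih1 ih2 => exact pvRel.trans ih2 ih1

theorem pvRel_mono {L L' : List (PySem.Set Int)} (hcov : ∀ s ∈ L, ∃ t ∈ L', ∀ a : Int, a ∈ s → a ∈ t)
    {a b : Int} (h : pvRel L a b) : pvRel L' a b := by
  induction h with
  | base hs ha hb =>
    obtain ⟨t, ht, hsub⟩ := hcov _ hs
    exact pvRel.base ht (hsub _ ha) (hsub _ hb)
  | trans _ _ ih1 ih2 => exact pvRel.trans ih1 ih2

theorem pvMemU_mono {L L' : List (PySem.Set Int)} (hcov : ∀ s ∈ L, ∃ t ∈ L', ∀ a : Int, a ∈ s → a ∈ t)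
    {a : Int} (h : pvMemU L a) : pvMemU L' a := by
  obtain ⟨s, hs, ha⟩ := h
  obtain ⟨t, ht, hsub⟩ := hcov _ hs
  exact ⟨t, ht, hsub _ ha⟩

theorem pvUniq {C : List (PySem.Set Int)} (hpw : C.Pairwise pvDisj) :
    ∀ {c c' : PySem.Set Int} {a : Int}, c ∈ C → c' ∈ C → a ∈ c → a ∈ c' → c = c' := by
  induction hpw with
  | nil => intro c c' a hc; simp at hc
  | cons hhead _ ih =>
    intro c c' a hc hc' hac hac'
    rcases List.mem_cons.mp hc with hc | hc <;> rcases List.mem_cons.mp hc' with hc' | hc'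
    · rw [hc, hc']
    · exact absurd (hhead _ hc' _ (hc ▸ hac)) (fun h => h hac')
    · exact absurd (hhead _ hc _ (hc' ▸ hac')) (fun h => h hac)
    · exact ih hc hc' hac hac'

theorem pvRel_in {L C : List (PySem.Set Int)} (h : pvInv L C) {a b : Int} (hr : pvRel L a b) :
    ∀ c ∈ C, a ∈ c → b ∈ c := by
  obtain ⟨hne, hpw, hconn, hcov, hsub⟩ := h
  induction hr with
  | base hs ha hb =>
    intro c hc hac
    obtain ⟨c', hc', hsub'⟩ := hcov _ hs
    have : c = c' := pvUniq hpw hc hc' hac (hsub' _ ha)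
    rw [this]; exact hsub' _ hb
  | trans _ _ ih1 ih2 =>
    intro c hc hac
    exact ih2 c hc (ih1 c hc hac)

-- the Boolean answer only depends on the canonical data: U nonempty, U connected, U = Q
theorem pvKey {L C : List (PySem.Set Int)} (h : pvInv L C) (Q : List Int) :
    ((C.length = 1 ∧ ∀ a : Int, (a ∈ C.headD [] ↔ a ∈ Q)) ↔
      ((∃ a : Int, pvMemU L a) ∧ (∀ a b : Int, pvMemU L a → pvMemU L b → pvRel L a b) ∧
        (∀ a : Int, pvMemU L a ↔ a ∈ Q))) := by
  obtain ⟨hne, hpw, hconn, hcov, hsub⟩ := h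
  constructor
  · rintro ⟨hlen, hhead⟩
    obtain ⟨c, rfl⟩ := List.length_eq_one_iff.mp hlen
    have hc : c ∈ [c] := List.mem_singleton.mpr rfl
    have hcU : ∀ a : Int, pvMemU L a ↔ a ∈ c := by
      intro a
      constructor
      · rintro ⟨s, hs, ha⟩
        obtain ⟨c', hc', hsub'⟩ := hcov s hs
        have : c' = c := List.mem_singleton.mp hc'
        exact this ▸ hsub' a ha
      · intro hac
        exact hsub c hc a hac
    refine ⟨?_, ?_, ?_⟩
    · obtain ⟨a, ha⟩ := hne c hc
      exact ⟨a, (hcU a).mpr ha⟩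
    · intro a b hma hmb
      exact hconn c hc a b ((hcU a).mp hma) ((hcU b).mp hmb)
    · intro a
      rw [hcU a]
      simpa using hhead a
  · rintro ⟨⟨a0, ha0⟩, hconn', hQ⟩
    have hex : ∃ c, c ∈ C := by
      obtain ⟨s, hs, ha⟩ := ha0
      obtain ⟨c, hc, _⟩ := hcov s hs
      exact ⟨c, hc⟩
    match C, hpw, hne, hconn, hsub, hex with
    | [], _, _, _, _, hex => exact absurd hex (by simp)
    | [c], hpw, hne, hconn, hsub, _ =>
      refine ⟨rfl, ?_⟩
      intro a
      simp only [List.headD_cons]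
      constructor
      · intro hac
        exact (hQ a).mp (hsub c (List.mem_singleton.mpr rfl) a hac)
      · intro haQ
        obtain ⟨s, hs, ha⟩ := (hQ a).mpr haQ
        obtain ⟨c', hc', hsub'⟩ := hcov s hs
        exact (List.mem_singleton.mp hc') ▸ hsub' a ha
    | c1 :: c2 :: rest, hpw, hne, hconn, hsub, _ =>
      exfalso
      have hc1 : c1 ∈ c1 :: c2 :: rest := by simp
      have hc2 : c2 ∈ c1 :: c2 :: rest := by simp
      obtain ⟨a, ha⟩ := hne c1 hc1
      obtain ⟨b, hb⟩ := hne c2 hc2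
      have hrab : pvRel L a b := hconn' a b (hsub c1 hc1 a ha) (hsub c2 hc2 b hb)
      have hbc1 : b ∈ c1 := pvRel_in ⟨hne, hpw, hconn, hcov, hsub⟩ hrab c1 hc1 ha
      have hdisj : pvDisj c1 c2 := (List.pairwise_cons.mp hpw).1 c2 (by simp)
      exact hdisj b hbc1 hb

theorem pvInterSet_ne_iff (g c : PySem.Set Int) :
    ((!(PySem.Set.inter g c).isEmpty) = true) ↔ (∃ a : Int, a ∈ g ∧ a ∈ c) := by
  rw [Bool.not_eq_eq_eq_not, Bool.not_true, List.isEmpty_eq_false_iff_exists_mem]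
  constructor
  · rintro ⟨a, ha⟩
    rw [PySem.Set.mem_inter _ _ _] at ha
    exact ⟨a, ha⟩
  · rintro ⟨a, ha⟩
    exact ⟨a, (PySem.Set.mem_inter _ _ _).mpr ha⟩

theorem pvInterNE_iff (x : List Int) (s : PySem.Set Int) :
    ((!(PySem.Set.inter (PySem.Set.ofList x) s).isEmpty) = true) ↔ pvTouch x s := by
  rw [pvInterSet_ne_iff]
  unfold pvTouch
  simp [PySem.Set.mem_ofList]

theorem pvIsdisjoint_ofList_iff (x : List Int) (c : PySem.Set Int) :
    (PySem.Set.isdisjoint (PySem.Set.ofList x) c = true) ↔ ¬ pvTouch x c := by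
  rw [PySem.Set.isdisjoint_iff]
  unfold pvTouch
  simp [PySem.Set.mem_ofList]

-- B's inner fold: the kept components and the membership of the merged set
theorem pvBFold (x : List Int) : ∀ (comps : List (PySem.Set Int)) (r : List (PySem.Set Int)) (m : PySem.Set Int),
    comps.Pairwise pvDisj →
    (∀ c ∈ comps, ((∃ a : Int, a ∈ m ∧ a ∈ c) ↔ pvTouch x c)) →
    (comps.foldl (fun p c => if PySem.Set.isdisjoint p.2 c then (p.1 ++ [c], p.2) else (p.1, PySem.Set.update p.2 c)) (r, m)).1
        = r ++ comps.filter (fun c => PySem.Set.isdisjoint (PySem.Set.ofList x) c)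
      ∧ ∀ a : Int,
          (a ∈ (comps.foldl (fun p c => if PySem.Set.isdisjoint p.2 c then (p.1 ++ [c], p.2) else (p.1, PySem.Set.update p.2 c)) (r, m)).2
            ↔ a ∈ m ∨ ∃ c ∈ comps, pvTouch x c ∧ a ∈ c) := by
  intro comps
  induction comps with
  | nil =>
    intro r m hpw hyp
    exact ⟨by simp, by intro a; simp⟩
  | cons c rest ih =>
    intro r m hpw hyp
    have hpw' := (List.pairwise_cons.mp hpw).2
    have hhd := (List.pairwise_cons.mp hpw).1
    have hymc : (∃ a : Int, a ∈ m ∧ a ∈ c) ↔ pvTouch x c := hyp c (by simp)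
    simp only [List.foldl_cons]
    by_cases hd : PySem.Set.isdisjoint m c = true
    · have hnt : ¬ pvTouch x c := by
        intro ht
        obtain ⟨a, ham, hac⟩ := hymc.mpr ht
        exact (PySem.Set.isdisjoint_iff m c).mp hd a ham hac
      have hfd : PySem.Set.isdisjoint (PySem.Set.ofList x) c = true :=
        (pvIsdisjoint_ofList_iff x c).mpr hnt
      simp only [hd, if_true]
      obtain ⟨h1, h2⟩ := ih (r ++ [c]) m hpw' (fun c' hc' => hyp c' (by simp [hc']))
      constructor
      · rw [h1, List.filter_cons_of_pos hfd]
        simp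
      · intro a
        rw [h2 a]
        constructor
        · rintro (ham | ⟨c', hc', ht, hac⟩)
          · exact Or.inl ham
          · exact Or.inr ⟨c', by simp [hc'], ht, hac⟩
        · rintro (ham | ⟨c', hc', ht, hac⟩)
          · exact Or.inl ham
          · rcases List.mem_cons.mp hc' with rfl | hc'
            · exact absurd ht hnt
            · exact Or.inr ⟨c', hc', ht, hac⟩
    · have hht : pvTouch x c := by
        by_contra hnt
        apply hd
        rw [PySem.Set.isdisjoint_iff]
        intro a ham hac
        exact hnt (hymc.mp ⟨a, ham, hac⟩)
      have hfd : PySem.Set.isdisjoint (PySem.Set.ofList x) c = false := by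
        rcases Bool.eq_false_or_eq_true (PySem.Set.isdisjoint (PySem.Set.ofList x) c) with h | h
        · exact absurd hht ((pvIsdisjoint_ofList_iff x c).mp h)
        · exact h
      simp only [hd, if_false, Bool.false_eq_true]
      have hyp'' : ∀ c' ∈ rest, ((∃ a : Int, a ∈ PySem.Set.update m c ∧ a ∈ c') ↔ pvTouch x c') := by
        intro c' hc'
        constructor
        · rintro ⟨a, ham, hac'⟩
          rw [PySem.Set.mem_update _ _ _] at ham
          rcases ham with ham | hamc
          · exact (hyp c' (by simp [hc'])).mp ⟨a, ham, hac'⟩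
          · exact absurd hac' (hhd c' hc' a hamc)
        · intro ht
          obtain ⟨a, ham, hac'⟩ := (hyp c' (by simp [hc'])).mpr ht
          exact ⟨a, (PySem.Set.mem_update _ _ _).mpr (Or.inl ham), hac'⟩
      obtain ⟨h1, h2⟩ := ih r (PySem.Set.update m c) hpw' hyp''
      constructor
      · rw [h1, List.filter_cons_of_neg (by simp [hfd])]
      · intro a
        rw [h2 a, PySem.Set.mem_update _ _ _]
        constructor
        · rintro ((ham | hamc) | ⟨c', hc', ht, hac⟩)
          · exact Or.inl ham
          · exact Or.inr ⟨c, by simp, hht, hamc⟩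
          · exact Or.inr ⟨c', by simp [hc'], ht, hac⟩
        · rintro (ham | ⟨c', hc', ht, hac⟩)
          · exact Or.inl (Or.inl ham)
          · rcases List.mem_cons.mp hc' with rfl | hc'
            · exact Or.inl (Or.inr hac)
            · exact Or.inr ⟨c', hc', ht, hac⟩

def pvMerged (C : List (PySem.Set Int)) (x : List Int) : PySem.Set Int :=
  (C.foldl (fun p c => if PySem.Set.isdisjoint p.2 c then (p.1 ++ [c], p.2) else (p.1, PySem.Set.update p.2 c)) (([] : List (PySem.Set Int)), PySem.Set.ofList x)).2

theorem pvMerged_mem {C : List (PySem.Set Int)} (hpw : C.Pairwise pvDisj) (x : List Int) (a : Int) :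
    a ∈ pvMerged C x ↔ a ∈ x ∨ ∃ c ∈ C, pvTouch x c ∧ a ∈ c := by
  have hb := pvBFold x C [] (PySem.Set.ofList x) hpw (by
    intro c hc
    unfold pvTouch
    simp [PySem.Set.mem_ofList])
  have := hb.2 a
  rw [PySem.Set.mem_ofList] at this
  exact this

theorem pvStepB_keep {spS : PySem.Set Int} {C : List (PySem.Set Int)} {x : List Int}
    (hpw : C.Pairwise pvDisj) (h : (∃ c ∈ C, pvTouch x c) ∨ pvTouch x spS) :
    pvStepB spS C x = C.filter (fun c => PySem.Set.isdisjoint (PySem.Set.ofList x) c) ++ [pvMerged C x] := by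
  have hb := pvBFold x C [] (PySem.Set.ofList x) hpw (by
    intro c hc
    unfold pvTouch
    simp [PySem.Set.mem_ofList])
  have hres := hb.1
  have hcond : ((C.foldl (fun p c => if PySem.Set.isdisjoint p.2 c then (p.1 ++ [c], p.2) else (p.1, PySem.Set.update p.2 c)) (([] : List (PySem.Set Int)), PySem.Set.ofList x)).1.length < C.length
      || !(PySem.Set.isdisjoint spS (C.foldl (fun p c => if PySem.Set.isdisjoint p.2 c then (p.1 ++ [c], p.2) else (p.1, PySem.Set.update p.2 c)) (([] : List (PySem.Set Int)), PySem.Set.ofList x)).2)) = true := by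
    rw [Bool.or_eq_true]
    rcases h with ⟨c, hc, ht⟩ | ⟨a, hax, hasp⟩
    · left
      rw [hres]
      simp only [List.nil_append, decide_eq_true_eq]
      exact List.length_filter_lt_length_iff_exists.mpr
        ⟨c, hc, fun hp => (pvIsdisjoint_ofList_iff x c).mp hp ht⟩
    · right
      rw [Bool.not_eq_eq_eq_not, Bool.not_true]
      rcases Bool.eq_false_or_eq_true (PySem.Set.isdisjoint spS (pvMerged C x)) with htr | hf
      · exact absurd ((pvMerged_mem hpw x a).mpr (Or.inl hax))
          ((PySem.Set.isdisjoint_iff _ _).mp htr a hasp)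
      · exact hf
  unfold pvStepB
  rw [if_pos hcond, hres]
  simp [pvMerged]

theorem pvStepB_skip {spS : PySem.Set Int} {C : List (PySem.Set Int)} {x : List Int}
    (hpw : C.Pairwise pvDisj) (h1 : ¬ ∃ c ∈ C, pvTouch x c) (h2 : ¬ pvTouch x spS) :
    pvStepB spS C x = C := by
  have hb := pvBFold x C [] (PySem.Set.ofList x) hpw (by
    intro c hc
    unfold pvTouch
    simp [PySem.Set.mem_ofList])
  have hres := hb.1
  have hfilter : C.filter (fun c => PySem.Set.isdisjoint (PySem.Set.ofList x) c) = C :=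
    List.filter_eq_self.mpr (fun c hc =>
      (pvIsdisjoint_ofList_iff x c).mpr (fun ht => h1 ⟨c, hc, ht⟩))
  have hcond : ((C.foldl (fun p c => if PySem.Set.isdisjoint p.2 c then (p.1 ++ [c], p.2) else (p.1, PySem.Set.update p.2 c)) (([] : List (PySem.Set Int)), PySem.Set.ofList x)).1.length < C.length
      || !(PySem.Set.isdisjoint spS (C.foldl (fun p c => if PySem.Set.isdisjoint p.2 c then (p.1 ++ [c], p.2) else (p.1, PySem.Set.update p.2 c)) (([] : List (PySem.Set Int)), PySem.Set.ofList x)).2)) = false := by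
    rw [Bool.or_eq_false_iff]
    constructor
    · rw [hres]
      simp only [List.nil_append, decide_eq_false_iff_not, not_lt]
      rw [hfilter]
    · rw [Bool.not_eq_false']
      have : PySem.Set.isdisjoint spS (pvMerged C x) = true := by
        rw [PySem.Set.isdisjoint_iff]
        intro a hasp hamer
        rcases (pvMerged_mem hpw x a).mp hamer with hax | ⟨c, hc, ht, _⟩
        · exact h2 ⟨a, hax, hasp⟩
        · exact h1 ⟨c, hc, ht⟩
      exact this
  unfold pvStepB
  rw [if_neg (by rw [hcond]; exact Bool.false_ne_true)]

theorem pvUpdFirst_id (x : List Int) : ∀ (L : List (PySem.Set Int)), (∀ s ∈ L, ¬ pvTouch x s) → pvUpdFirst x L = L := by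
  intro L
  induction L with
  | nil => intro _; rfl
  | cons s r ih =>
    intro h
    unfold pvUpdFirst
    rw [if_neg (by
      intro hcond
      exact h s (by simp) ((pvInterNE_iff x s).mp hcond))]
    rw [ih (fun t ht => h t (by simp [ht]))]

theorem pvUpdFirst_decomp (x : List Int) : ∀ (L : List (PySem.Set Int)), (∃ s ∈ L, pvTouch x s) →
    ∃ L₁ s₀ L₂, L = L₁ ++ s₀ :: L₂ ∧ (∀ s ∈ L₁, ¬ pvTouch x s) ∧ pvTouch x s₀ ∧
      pvUpdFirst x L = L₁ ++ PySem.Set.update s₀ x :: L₂ := by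
  intro L
  induction L with
  | nil => rintro ⟨s, hs, _⟩; simp at hs
  | cons s r ih =>
    intro h
    by_cases hts : pvTouch x s
    · refine ⟨[], s, r, by simp, by simp, hts, ?_⟩
      unfold pvUpdFirst
      rw [if_pos ((pvInterNE_iff x s).mpr hts)]
      simp
    · obtain ⟨t, ht, htt⟩ := h
      rcases List.mem_cons.mp ht with rfl | ht'
      · exact absurd htt hts
      · obtain ⟨L₁, s₀, L₂, heq, hL₁, hs₀, hupd⟩ := ih ⟨t, ht', htt⟩
        refine ⟨s :: L₁, s₀, L₂, by simp [heq], ?_, hs₀, ?_⟩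
        · intro u hu
          rcases List.mem_cons.mp hu with rfl | hu'
          · exact hts
          · exact hL₁ u hu'
        · unfold pvUpdFirst
          rw [if_neg (fun hcond => hts ((pvInterNE_iff x s).mp hcond))]
          simp [hupd]

-- the merged component is connected through L' as soon as L' has a set w ⊇ x
theorem pvMerged_conn {L L' C : List (PySem.Set Int)} {x : List Int}
    (hinv : pvInv L C) (w : PySem.Set Int) (hw : w ∈ L') (hxw : ∀ a : Int, a ∈ x → a ∈ w)
    (hcov : ∀ s ∈ L, ∃ t ∈ L', ∀ a : Int, a ∈ s → a ∈ t) :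
    ∀ a b : Int, a ∈ pvMerged C x → b ∈ pvMerged C x → pvRel L' a b := by
  obtain ⟨hne, hpw, hconn, hcov', hsub⟩ := hinv
  have haux : ∀ a : Int, a ∈ pvMerged C x → ∀ u : Int, u ∈ x → pvRel L' a u := by
    intro a ha u hu
    rcases (pvMerged_mem hpw x a).mp ha with hax | ⟨c, hc, ⟨t, htx, htc⟩, hac⟩
    · exact pvRel.base hw (hxw a hax) (hxw u hu)
    · exact pvRel.trans (pvRel_mono hcov (hconn c hc a t hac htc))
        (pvRel.base hw (hxw t htx) (hxw u hu))
  intro a b ha hb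
  obtain ⟨u, hu⟩ : ∃ u : Int, u ∈ x := by
    rcases (pvMerged_mem hpw x a).mp ha with hax | ⟨c, hc, ⟨t, htx, _⟩, _⟩
    · exact ⟨a, hax⟩
    · exact ⟨t, htx⟩
  exact pvRel.trans (haux a ha u hu) (pvRel_symm (haux b hb u hu))

-- the kept case: B's new component list is the components of any L' that extends L by x
theorem pvKeepInv {L L' C : List (PySem.Set Int)} {x : List Int}
    (hinv : pvInv L C) (hxne : ∃ u : Int, u ∈ x)
    (w : PySem.Set Int) (hw : w ∈ L') (hxw : ∀ a : Int, a ∈ x → a ∈ w)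
    (hcov : ∀ s ∈ L, ∃ t ∈ L', ∀ a : Int, a ∈ s → a ∈ t)
    (hcovC : ∀ s ∈ L', (∀ a : Int, a ∈ s → a ∈ pvMerged C x) ∨
      ∃ c ∈ C, (PySem.Set.isdisjoint (PySem.Set.ofList x) c = true) ∧ ∀ a : Int, a ∈ s → a ∈ c) :
    pvInv L' (C.filter (fun c => PySem.Set.isdisjoint (PySem.Set.ofList x) c) ++ [pvMerged C x]) := by
  obtain ⟨hne, hpw, hconn, hcovd, hsub⟩ := hinv
  have hsubmerge : ∀ c ∈ C, pvTouch x c → ∀ a : Int, a ∈ c → a ∈ pvMerged C x := by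
    intro c hc ht a hac
    exact (pvMerged_mem hpw x a).mpr (Or.inr ⟨c, hc, ht, hac⟩)
  have hmemrest : ∀ c, c ∈ C.filter (fun c => PySem.Set.isdisjoint (PySem.Set.ofList x) c) →
      c ∈ C ∧ ¬ pvTouch x c := by
    intro c hc
    have := List.mem_filter.mp hc
    exact ⟨this.1, (pvIsdisjoint_ofList_iff x c).mp this.2⟩
  refine ⟨?_, ?_, ?_, ?_, ?_⟩
  · intro c hc
    rcases List.mem_append.mp hc with hc | hc
    · exact hne c (hmemrest c hc).1
    · obtain ⟨u, hu⟩ := hxne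
      rw [List.mem_singleton.mp hc]
      exact ⟨u, (pvMerged_mem hpw x u).mpr (Or.inl hu)⟩
  · rw [List.pairwise_append]
    refine ⟨List.Pairwise.filter _ hpw, List.pairwise_singleton _ _, ?_⟩
    intro c hc m hm
    rw [List.mem_singleton.mp hm]
    obtain ⟨hcC, hnt⟩ := hmemrest c hc
    intro a hac hamer
    rcases (pvMerged_mem hpw x a).mp hamer with hax | ⟨c', hc', ht', hac'⟩
    · exact hnt ⟨a, hax, hac⟩
    · exact hnt (pvUniq hpw hcC hc' hac hac' ▸ ht')
  · intro c hc a b hac hbc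
    rcases List.mem_append.mp hc with hc | hc
    · exact pvRel_mono hcov (hconn c (hmemrest c hc).1 a b hac hbc)
    · have := List.mem_singleton.mp hc
      subst this
      exact pvMerged_conn ⟨hne, hpw, hconn, hcovd, hsub⟩ w hw hxw hcov a b hac hbc
  · intro s hs
    rcases hcovC s hs with hmer | ⟨c, hc, hdis, hsubc⟩
    · exact ⟨pvMerged C x, List.mem_append.mpr (Or.inr (by simp)), hmer⟩
    · exact ⟨c, List.mem_append.mpr (Or.inl (List.mem_filter.mpr ⟨hc, hdis⟩)), hsubc⟩
  · intro c hc a hac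
    rcases List.mem_append.mp hc with hc | hc
    · exact pvMemU_mono hcov (hsub c (hmemrest c hc).1 a hac)
    · rw [List.mem_singleton.mp hc] at hac
      rcases (pvMerged_mem hpw x a).mp hac with hax | ⟨c', hc', _, hac'⟩
      · exact ⟨w, hw, hxw a hax⟩
      · exact pvMemU_mono hcov (hsub c' hc' a hac')

-- one simultaneous step of A and B preserves the component invariant
theorem pvStep_inv (spS : PySem.Set Int) (x : List Int) (L C : List (PySem.Set Int))
    (h : pvInv L C) (hne : pvNE L) :
    pvInv (pvStepA spS L x) (pvStepB spS C x) ∧ pvNE (pvStepA spS L x) := by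
  obtain ⟨hneC, hpw, hconn, hcovd, hsub⟩ := h
  have hbridge : (∃ s ∈ L, pvTouch x s) ↔ (∃ c ∈ C, pvTouch x c) := by
    constructor
    · rintro ⟨s, hs, a, hax, has⟩
      obtain ⟨c, hc, hsubc⟩ := hcovd s hs
      exact ⟨c, hc, a, hax, hsubc a has⟩
    · rintro ⟨c, hc, a, hax, hac⟩
      obtain ⟨s, hs, has⟩ := hsub c hc a hac
      exact ⟨s, hs, a, hax, has⟩
  by_cases hsp : pvTouch x spS
  · have hA : pvStepA spS L x = L ++ [PySem.Set.ofList x] := by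
      unfold pvStepA
      rw [if_pos ((pvInterNE_iff x spS).mpr hsp)]
    have hB : pvStepB spS C x
        = C.filter (fun c => PySem.Set.isdisjoint (PySem.Set.ofList x) c) ++ [pvMerged C x] :=
      pvStepB_keep hpw (Or.inr hsp)
    obtain ⟨u, hux, _⟩ := hsp
    rw [hA, hB]
    constructor
    · refine pvKeepInv ⟨hneC, hpw, hconn, hcovd, hsub⟩ ⟨u, hux⟩ (PySem.Set.ofList x)
        (List.mem_append.mpr (Or.inr (by simp))) (fun a ha => (PySem.Set.mem_ofList x a).mpr ha)
        (fun s hs => ⟨s, List.mem_append.mpr (Or.inl hs), fun a ha => ha⟩) ?_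
      intro s hs
      rcases List.mem_append.mp hs with hs | hs
      · obtain ⟨c, hc, hsubc⟩ := hcovd s hs
        by_cases ht : pvTouch x c
        · exact Or.inl (fun a ha =>
            (pvMerged_mem hpw x a).mpr (Or.inr ⟨c, hc, ht, hsubc a ha⟩))
        · exact Or.inr ⟨c, hc, (pvIsdisjoint_ofList_iff x c).mpr ht, hsubc⟩
      · rw [List.mem_singleton.mp hs]
        exact Or.inl (fun a ha =>
          (pvMerged_mem hpw x a).mpr (Or.inl ((PySem.Set.mem_ofList x a).mp ha)))
    · intro s hs
      rcases List.mem_append.mp hs with hs | hs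
      · exact hne s hs
      · rw [List.mem_singleton.mp hs]
        exact ⟨u, (PySem.Set.mem_ofList x u).mpr hux⟩
  · by_cases htc : ∃ c ∈ C, pvTouch x c
    · obtain ⟨L₁, s₀, L₂, heq, hL₁, hs₀, hupd⟩ := pvUpdFirst_decomp x L (hbridge.mpr htc)
      have hA : pvStepA spS L x = L₁ ++ PySem.Set.update s₀ x :: L₂ := by
        unfold pvStepA
        rw [if_neg (fun hcond => hsp ((pvInterNE_iff x spS).mp hcond))]
        exact hupd
      have hB : pvStepB spS C x
          = C.filter (fun c => PySem.Set.isdisjoint (PySem.Set.ofList x) c) ++ [pvMerged C x] :=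
        pvStepB_keep hpw (Or.inl htc)
      obtain ⟨c₀x, hc₀x, u, hux, _⟩ := htc
      have hwmem : PySem.Set.update s₀ x ∈ L₁ ++ PySem.Set.update s₀ x :: L₂ := by simp
      have hcov : ∀ s ∈ L, ∃ t ∈ L₁ ++ PySem.Set.update s₀ x :: L₂, ∀ a : Int, a ∈ s → a ∈ t := by
        intro s hs
        rw [heq] at hs
        rcases List.mem_append.mp hs with hs | hs
        · exact ⟨s, by simp [hs], fun a ha => ha⟩
        · rcases List.mem_cons.mp hs with hseq | hs
          · exact ⟨PySem.Set.update s₀ x, hwmem,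
              fun a ha => (PySem.Set.mem_update _ _ _).mpr (Or.inl (hseq ▸ ha))⟩
          · exact ⟨s, by simp [hs], fun a ha => ha⟩
      rw [hA, hB]
      constructor
      · refine pvKeepInv ⟨hneC, hpw, hconn, hcovd, hsub⟩ ⟨u, hux⟩ (PySem.Set.update s₀ x)
          hwmem (fun a ha => (PySem.Set.mem_update _ _ _).mpr (Or.inr ha)) hcov ?_
        have hs₀L : s₀ ∈ L := by rw [heq]; simp
        obtain ⟨c₀, hc₀, hsubc₀⟩ := hcovd s₀ hs₀L
        have htc₀ : pvTouch x c₀ := by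
          obtain ⟨t, htx, hts₀⟩ := hs₀
          exact ⟨t, htx, hsubc₀ t hts₀⟩
        intro s hs
        have hold : s ∈ L₁ ∨ s ∈ L₂ ∨ s = PySem.Set.update s₀ x := by
          rcases List.mem_append.mp hs with hs | hs
          · exact Or.inl hs
          · rcases List.mem_cons.mp hs with hs | hs
            · exact Or.inr (Or.inr hs)
            · exact Or.inr (Or.inl hs)
        rcases hold with hs' | hs' | rfl
        · have hsL : s ∈ L := by rw [heq]; simp [hs']
          obtain ⟨c, hc, hsubc⟩ := hcovd s hsL
          by_cases ht : pvTouch x c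
          · exact Or.inl (fun a ha =>
              (pvMerged_mem hpw x a).mpr (Or.inr ⟨c, hc, ht, hsubc a ha⟩))
          · exact Or.inr ⟨c, hc, (pvIsdisjoint_ofList_iff x c).mpr ht, hsubc⟩
        · have hsL : s ∈ L := by rw [heq]; simp [hs']
          obtain ⟨c, hc, hsubc⟩ := hcovd s hsL
          by_cases ht : pvTouch x c
          · exact Or.inl (fun a ha =>
              (pvMerged_mem hpw x a).mpr (Or.inr ⟨c, hc, ht, hsubc a ha⟩))
          · exact Or.inr ⟨c, hc, (pvIsdisjoint_ofList_iff x c).mpr ht, hsubc⟩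
        · refine Or.inl ?_
          intro a ha
          rcases (PySem.Set.mem_update _ _ _).mp ha with ha | ha
          · exact (pvMerged_mem hpw x a).mpr (Or.inr ⟨c₀, hc₀, htc₀, hsubc₀ a ha⟩)
          · exact (pvMerged_mem hpw x a).mpr (Or.inl ha)
      · intro s hs
        rcases List.mem_append.mp hs with hs | hs
        · exact hne s (by rw [heq]; simp [hs])
        · rcases List.mem_cons.mp hs with rfl | hs
          · obtain ⟨a, ha⟩ := hne s₀ (by rw [heq]; simp)
            exact ⟨a, (PySem.Set.mem_update _ _ _).mpr (Or.inl ha)⟩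
          · exact hne s (by rw [heq]; simp [hs])
    · have hA : pvStepA spS L x = L := by
        unfold pvStepA
        rw [if_neg (fun hcond => hsp ((pvInterNE_iff x spS).mp hcond))]
        exact pvUpdFirst_id x L (fun s hs ht => htc (hbridge.mp ⟨s, hs, ht⟩))
      rw [hA, pvStepB_skip hpw htc hsp]
      exact ⟨⟨hneC, hpw, hconn, hcovd, hsub⟩, hne⟩

theorem pvFold_inv (spS : PySem.Set Int) : ∀ (xs : List (List Int)) (L C : List (PySem.Set Int)),
    pvInv L C → pvNE L →
    pvInv (xs.foldl (pvStepA spS) L) (xs.foldl (pvStepB spS) C) ∧ pvNE (xs.foldl (pvStepA spS) L) := by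
  intro xs
  induction xs with
  | nil => intro L C h hne; exact ⟨h, hne⟩
  | cons x xs ih =>
    intro L C h hne
    obtain ⟨h', hne'⟩ := pvStep_inv spS x L C h hne
    simpa using ih (pvStepA spS L x) (pvStepB spS C x) h' hne'

theorem pvFT_none {g : PySem.Set Int} : ∀ {pool}, pvFirstTouch g pool = none →
    ∀ p ∈ pool, ∀ a : Int, a ∈ g → a ∉ p := by
  intro pool
  induction pool with
  | nil => intro _ p hp; simp at hp
  | cons c r ih =>
    intro h p hp a hag hap
    simp only [pvFirstTouch] at h
    split at h
    · cases h
    · rename_i hcond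
      have hcf : (!(PySem.Set.inter g c).isEmpty) = false := by
        rcases Bool.eq_false_or_eq_true (!(PySem.Set.inter g c).isEmpty) with hb | hb
        · exact absurd hb hcond
        · exact hb
      rcases List.mem_cons.mp hp with rfl | hp'
      · have : ¬ (∃ b : Int, b ∈ g ∧ b ∈ p) := by
          intro hex
          rw [(pvInterSet_ne_iff g p).mpr hex] at hcf
          cases hcf
        exact this ⟨a, hag, hap⟩
      · cases hft : pvFirstTouch g r with
        | none => exact ih hft p hp' a hag hap
        | some cr =>
          rw [hft] at h
          obtain ⟨c', r'⟩ := cr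
          cases h

theorem pvFT_some {g : PySem.Set Int} : ∀ {pool c r}, pvFirstTouch g pool = some (c, r) →
    c ∈ pool ∧ (∃ a : Int, a ∈ g ∧ a ∈ c) ∧ (∀ p ∈ pool, p = c ∨ p ∈ r) ∧ (∀ p ∈ r, p ∈ pool) := by
  intro pool
  induction pool with
  | nil => intro c r h; simp [pvFirstTouch] at h
  | cons s t ih =>
    intro c r h
    simp only [pvFirstTouch] at h
    split at h
    · rename_i hcond
      cases h
      refine ⟨by simp, (pvInterSet_ne_iff g s).mp hcond, ?_, ?_⟩
      · intro p hp
        rcases List.mem_cons.mp hp with h' | h'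
        · exact Or.inl h'
        · exact Or.inr h'
      · intro p hp; simp [hp]
    · cases hft : pvFirstTouch g t with
      | none => rw [hft] at h; cases h
      | some cr =>
        rw [hft] at h
        obtain ⟨c', r'⟩ := cr
        cases h
        obtain ⟨h1, h2, h3, h4⟩ := ih hft
        refine ⟨by simp [h1], h2, ?_, ?_⟩
        · intro p hp
          rcases List.mem_cons.mp hp with rfl | hp'
          · exact Or.inr (by simp)
          · rcases h3 p hp' with h | h
            · exact Or.inl h
            · exact Or.inr (by simp [h])
        · intro p hp
          rcases List.mem_cons.mp hp with rfl | hp'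
          · simp
          · simp [h4 p hp']

theorem pvGrow_props (L : List (PySem.Set Int)) : ∀ (g : PySem.Set Int) (pool : List (PySem.Set Int)),
    (∀ p ∈ pool, p ∈ L) → (∀ a b : Int, a ∈ g → b ∈ g → pvRel L a b) →
    (∀ a : Int, a ∈ g → a ∈ (pvGrow g pool).1) ∧
    (∀ a b : Int, a ∈ (pvGrow g pool).1 → b ∈ (pvGrow g pool).1 → pvRel L a b) ∧
    (∀ a : Int, a ∈ (pvGrow g pool).1 → a ∈ g ∨ ∃ p ∈ pool, a ∈ p) ∧
    (∀ p ∈ pool, (∀ a : Int, a ∈ p → a ∈ (pvGrow g pool).1) ∨ p ∈ (pvGrow g pool).2) ∧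
    (∀ p ∈ (pvGrow g pool).2, p ∈ pool) ∧
    (∀ p ∈ (pvGrow g pool).2, ∀ a : Int, a ∈ p → a ∉ (pvGrow g pool).1) := by
  intro g pool
  induction g, pool using pvGrow.induct with
  | case1 g pool h =>
    intro hpool hconn
    have he : pvGrow g pool = (g, pool) := by rw [pvGrow, h]
    rw [he]
    have hdis := pvFT_none h
    exact ⟨fun a ha => ha, hconn, fun a ha => Or.inl ha,
      fun p hp => Or.inr hp, fun p hp => hp,
      fun p hp a hap hag => hdis p hp a hag hap⟩
  | case2 g pool c r h ih =>
    intro hpool hconn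
    have he : pvGrow g pool = pvGrow (PySem.Set.union g c) r := by rw [pvGrow, h]
    obtain ⟨hcpool, ⟨t, htg, htc⟩, hsplit, hrsub⟩ := pvFT_some h
    have hcL : c ∈ L := hpool c hcpool
    have hconn' : ∀ a b : Int, a ∈ PySem.Set.union g c → b ∈ PySem.Set.union g c → pvRel L a b := by
      have haux : ∀ a : Int, a ∈ PySem.Set.union g c → pvRel L a t := by
        intro a ha
        rcases (PySem.Set.mem_union _ _ _).mp ha with ha | ha
        · exact hconn a t ha htg
        · exact pvRel.base hcL ha htc
      intro a b ha hb
      exact pvRel.trans (haux a ha) (pvRel_symm (haux b hb))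
    obtain ⟨ih1, ih2, ih3, ih4, ih5, ih6⟩ := ih (fun p hp => hpool p (hrsub p hp)) hconn'
    rw [he]
    refine ⟨?_, ih2, ?_, ?_, ?_, ih6⟩
    · intro a ha
      exact ih1 a ((PySem.Set.mem_union _ _ _).mpr (Or.inl ha))
    · intro a ha
      rcases ih3 a ha with ha' | ⟨p, hp, hap⟩
      · rcases (PySem.Set.mem_union _ _ _).mp ha' with ha'' | ha''
        · exact Or.inl ha''
        · exact Or.inr ⟨c, hcpool, ha''⟩
      · exact Or.inr ⟨p, hrsub p hp, hap⟩
    · intro p hp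
      rcases hsplit p hp with rfl | hp'
      · exact Or.inl (fun a hap => ih1 a ((PySem.Set.mem_union _ _ _).mpr (Or.inr hap)))
      · exact ih4 p hp'
    · intro p hp
      exact hrsub p (ih5 p hp)

theorem pvCC_inv (L : List (PySem.Set Int)) : ∀ (pool : List (PySem.Set Int)),
    (∀ p ∈ pool, p ∈ L) → (∀ p ∈ pool, ∃ a : Int, a ∈ p) →
    (∀ c ∈ pvCC pool, ∃ a : Int, a ∈ c) ∧
    (pvCC pool).Pairwise pvDisj ∧
    (∀ c ∈ pvCC pool, ∀ a b : Int, a ∈ c → b ∈ c → pvRel L a b) ∧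
    (∀ p ∈ pool, ∃ c ∈ pvCC pool, ∀ a : Int, a ∈ p → a ∈ c) ∧
    (∀ c ∈ pvCC pool, ∀ a : Int, a ∈ c → ∃ p ∈ pool, a ∈ p) := by
  intro pool
  induction pool using pvCC.induct with
  | case1 =>
    intro _ _
    exact ⟨by simp [pvCC], by simp [pvCC], by simp [pvCC], by simp, by simp [pvCC]⟩
  | case2 g rest ih =>
    intro hpool hne
    have he : pvCC (g :: rest) = (pvGrow g rest).1 :: pvCC (pvGrow g rest).2 := by rw [pvCC]
    have hgL : g ∈ L := hpool g (by simp)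
    obtain ⟨gp1, gp2, gp3, gp4, gp5, gp6⟩ := pvGrow_props L g rest
      (fun p hp => hpool p (by simp [hp]))
      (fun a b ha hb => pvRel.base hgL ha hb)
    obtain ⟨ih1, ih2, ih3, ih4, ih5⟩ := ih
      (fun p hp => hpool p (by simp [gp5 p hp]))
      (fun p hp => hne p (by simp [gp5 p hp]))
    rw [he]
    refine ⟨?_, ?_, ?_, ?_, ?_⟩
    · intro c hc
      rcases List.mem_cons.mp hc with rfl | hc'
      · obtain ⟨a, ha⟩ := hne g (by simp)
        exact ⟨a, gp1 a ha⟩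
      · exact ih1 c hc'
    · rw [List.pairwise_cons]
      refine ⟨?_, ih2⟩
      intro c hc a hag hac
      obtain ⟨p, hp, hap⟩ := ih5 c hc a hac
      exact gp6 p hp a hap hag
    · intro c hc a b ha hb
      rcases List.mem_cons.mp hc with rfl | hc'
      · exact gp2 a b ha hb
      · exact ih3 c hc' a b ha hb
    · intro q hq
      rcases List.mem_cons.mp hq with hq' | hq'
      · exact ⟨(pvGrow g rest).1, by simp, fun a ha => gp1 a (hq' ▸ ha)⟩
      · rcases gp4 q hq' with habs | hrem
        · exact ⟨(pvGrow g rest).1, by simp, habs⟩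
        · obtain ⟨c, hc, hsubc⟩ := ih4 q hrem
          exact ⟨c, by simp [hc], hsubc⟩
    · intro c hc a hac
      rcases List.mem_cons.mp hc with rfl | hc'
      · rcases gp3 a hac with hag | ⟨p, hp, hap⟩
        · exact ⟨g, by simp, hag⟩
        · exact ⟨p, by simp [hp], hap⟩
      · obtain ⟨p, hp, hap⟩ := ih5 c hc' a hac
        exact ⟨p, by simp [gp5 p hp], hap⟩

theorem pvDedupAux_pres : ∀ (l acc : List (PySem.Set Int)), ∀ p ∈ acc,
    p ∈ l.foldl (fun acc s => if acc.any (fun t => PySem.Set.equal s t) then acc else acc ++ [s]) acc := by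
  intro l
  induction l with
  | nil => intro acc p hp; simpa using hp
  | cons c t ih =>
    intro acc p hp
    simp only [List.foldl_cons]
    apply ih
    split
    · exact hp
    · exact List.mem_append.mpr (Or.inl hp)

theorem pvDedupAux_sub : ∀ (l acc : List (PySem.Set Int)), ∀ p,
    p ∈ l.foldl (fun acc s => if acc.any (fun t => PySem.Set.equal s t) then acc else acc ++ [s]) acc →
    p ∈ acc ∨ p ∈ l := by
  intro l
  induction l with
  | nil => intro acc p hp; exact Or.inl (by simpa using hp)
  | cons c t ih =>
    intro acc p hp
    simp only [List.foldl_cons] at hp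
    rcases ih _ p hp with hacc | hmem
    · by_cases hany : (acc.any (fun t => PySem.Set.equal c t)) = true
      · rw [if_pos hany] at hacc
        exact Or.inl hacc
      · rw [if_neg hany] at hacc
        rcases List.mem_append.mp hacc with h | h
        · exact Or.inl h
        · exact Or.inr (by simp [List.mem_singleton.mp h])
    · exact Or.inr (by simp [hmem])

theorem pvDedupAux_repr : ∀ (l acc : List (PySem.Set Int)), ∀ s ∈ l,
    ∃ p ∈ l.foldl (fun acc s => if acc.any (fun t => PySem.Set.equal s t) then acc else acc ++ [s]) acc,
      ∀ a : Int, a ∈ s ↔ a ∈ p := by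
  intro l
  induction l with
  | nil => intro acc s hs; simp at hs
  | cons c t ih =>
    intro acc s hs
    simp only [List.foldl_cons]
    rcases List.mem_cons.mp hs with hs' | hs'
    · by_cases hany : (acc.any (fun t => PySem.Set.equal c t)) = true
      · obtain ⟨t', ht', heq⟩ := List.any_eq_true.mp hany
        refine ⟨t', ?_, fun a => hs' ▸ ((PySem.Set.equal_iff c t').mp heq a)⟩
        rw [if_pos hany]
        exact pvDedupAux_pres t acc t' ht'
      · refine ⟨c, ?_, fun a => hs' ▸ Iff.rfl⟩
        rw [if_neg hany]
        exact pvDedupAux_pres t _ c (by simp)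
    · exact ih _ s hs'

theorem pvDedup_sub (l : List (PySem.Set Int)) : ∀ p ∈ pvDedupSets l, p ∈ l := by
  intro p hp
  rcases pvDedupAux_sub l [] p hp with h | h
  · simp at h
  · exact h

theorem pvDedup_repr (l : List (PySem.Set Int)) : ∀ s ∈ l, ∃ p ∈ pvDedupSets l, ∀ a : Int, a ∈ s ↔ a ∈ p := by
  intro s hs
  exact pvDedupAux_repr l [] s hs

theorem pvInv_cc {L : List (PySem.Set Int)} (hne : pvNE L) : pvInv L (pvCC (pvDedupSets L)) := by
  have hsubL := pvDedup_sub L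
  obtain ⟨c1, c2, c3, c4, c5⟩ := pvCC_inv L (pvDedupSets L) hsubL (fun p hp => hne p (hsubL p hp))
  refine ⟨c1, c2, c3, ?_, ?_⟩
  · intro s hs
    obtain ⟨p, hp, hiff⟩ := pvDedup_repr L s hs
    obtain ⟨c, hc, hsubc⟩ := c4 p hp
    exact ⟨c, hc, fun a ha => hsubc a ((hiff a).mp ha)⟩
  · intro c hc a hac
    obtain ⟨p, hp, hap⟩ := c5 c hc a hac
    exact ⟨p, hsubL p hp, hap⟩

theorem pvGuard_eq (x0 sp : List Int) :
    (PySem.Set.inter (PySem.Set.ofList x0) (PySem.Set.ofList sp)).isEmpty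
      = PySem.Set.isdisjoint (PySem.Set.ofList sp) x0 := by
  apply Bool.coe_iff_coe.mp
  constructor
  · intro hemp
    rw [PySem.Set.isdisjoint_iff]
    intro a hasp hax0
    have hne : (!(PySem.Set.inter (PySem.Set.ofList x0) (PySem.Set.ofList sp)).isEmpty) = true :=
      (pvInterNE_iff x0 (PySem.Set.ofList sp)).mpr ⟨a, hax0, hasp⟩
    rw [hemp] at hne
    simp at hne
  · intro hdis
    by_contra hne'
    have hff : (PySem.Set.inter (PySem.Set.ofList x0) (PySem.Set.ofList sp)).isEmpty = false := by
      cases hb : (PySem.Set.inter (PySem.Set.ofList x0) (PySem.Set.ofList sp)).isEmpty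
      · rfl
      · exact absurd hb hne'
    obtain ⟨a, hax0, hasp⟩ := (pvInterNE_iff x0 (PySem.Set.ofList sp)).mp (by rw [hff]; rfl)
    exact (PySem.Set.isdisjoint_iff _ _).mp hdis a hasp hax0

-- ===== VERDICT (by name: the statement is the Claim_ definition above) =====
theorem check_will_entangling_spec : Claim_equal_check_will_entangling := by
  intro lp q sp hdom hpre
  unfold Spec_check_will_entangling
  cases lp with
  | nil => exact absurd rfl hpre
  | cons x0 tl =>
    simp only [check_will_entangling, check_will_entangling_alt]
    have hg := pvGuard_eq x0 sp
    by_cases he : (PySem.Set.inter (PySem.Set.ofList x0) (PySem.Set.ofList sp)).isEmpty = true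
    · rw [if_pos he, if_pos (by rw [← hg]; exact he)]
    · rw [if_neg he, if_neg (by rw [← hg]; exact he)]
      have hfold := pvFold_inv (PySem.Set.ofList sp) (x0 :: tl) [] []
        ⟨by simp, by simp, by simp, by simp, by simp⟩ (by intro s hs; simp at hs)
      have hInvB := hfold.1
      have hInvA := pvInv_cc hfold.2
      have hA := pvKey hInvA (PySem.Set.ofList q)
      have hB := pvKey hInvB (PySem.Set.ofList q)
      apply Bool.coe_iff_coe.mp
      rw [Bool.and_eq_true, Bool.and_eq_true, decide_eq_true_eq, decide_eq_true_eq,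
        PySem.Set.equal_iff, PySem.Set.equal_iff]
      constructor
      · rintro ⟨hl, hiff⟩
        exact hB.mpr (hA.mp ⟨hl, fun a => ((PySem.Set.mem_ofList _ a).symm.trans (hiff a))⟩)
      · rintro ⟨hl, hiff⟩
        obtain ⟨hl', hiff'⟩ := hA.mpr (hB.mp ⟨hl, hiff⟩)
        exact ⟨hl', fun a => ((PySem.Set.mem_ofList _ a).trans (hiff' a))⟩
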